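-- pv_equiv track=rewrite | github.com/Diaboloss712/CodingTest | 프로그래머스/1/82612. 부족한 금액 계산하기/부족한 금액 계산하기.py | solution
-- ===== SOURCE A (Python) =====
-- def solution(price, money, count):
--     answer = 0
--     total_count = 0
--     for i in range(count+1):
--         total_count += i
--     total_price = total_count * price
--     if total_price > money:
--         answer = total_price - money
--     return answer
-- ===== SOURCE B (Python) =====
-- def solution(price, money, count):
--     n = count if count > 0 else 0
--     shortfall = price * n * (n + 1) // 2 - money
--     return shortfall if shortfall > 0 else 0
-- ===== Notes on version B (the rewrite author's own statement) =====
-- stated objective: faster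
-- what changed: replaces the O(count) summation loop with the closed-form triangular number count*(count+1)//2
import Mathlib
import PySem

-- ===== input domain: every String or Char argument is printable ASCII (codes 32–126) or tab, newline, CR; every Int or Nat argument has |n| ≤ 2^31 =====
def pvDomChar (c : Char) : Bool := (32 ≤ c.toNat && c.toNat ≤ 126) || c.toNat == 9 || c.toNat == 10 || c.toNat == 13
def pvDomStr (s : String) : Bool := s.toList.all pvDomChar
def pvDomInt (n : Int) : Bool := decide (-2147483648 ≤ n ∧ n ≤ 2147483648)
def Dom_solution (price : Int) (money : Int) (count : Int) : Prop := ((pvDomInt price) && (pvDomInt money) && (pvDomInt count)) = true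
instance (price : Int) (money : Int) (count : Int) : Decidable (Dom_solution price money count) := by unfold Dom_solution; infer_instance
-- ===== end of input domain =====

-- B replaces A's O(count) summation loop by the closed-form triangular number (objective: faster, asymptotic).

-- ===== PORT A =====
def solution (price : Int) (money : Int) (count : Int) : Int :=
  let answer : Int := 0
  let total_count : Int := (PySem.List.pyRange 0 (count + 1) 1).foldl (fun acc i => acc + i) 0
  let total_price : Int := total_count * price
  let answer : Int := if total_price > money then total_price - money else answer
  answer

-- ===== PORT B =====
def solution_alt (price : Int) (money : Int) (count : Int) : Int :=
  let n : Int := if count > 0 then count else 0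
  let shortfall : Int := PySem.Int.floordiv (price * n * (n + 1)) 2 - money
  if shortfall > 0 then shortfall else 0

-- ===== PRECONDITION & SPEC =====
def Spec_solution (price : Int) (money : Int) (count : Int) (out : Int) : Prop := out = solution_alt price money count
instance (price : Int) (money : Int) (count : Int) (out : Int) : Decidable (Spec_solution price money count out) := by unfold Spec_solution; infer_instance

-- ===== CLAIM (what is proved, stated in full; the proofs are below) =====
def Claim_equal_solution : Prop := ∀ (price : Int) (money : Int) (count : Int), Dom_solution price money count → Spec_solution price money count (solution price money count)

-- ===== LEMMAS AND PROOFS =====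

-- sum of range(n) doubled is n*(n-1)
theorem pv_two_sum (n : Nat) :
    ((PySem.List.pyRange 0 (n : Int) 1).foldl (fun a i => a + i) 0) * 2 = (n : Int) * ((n : Int) - 1) := by
  induction n with
  | zero => simp [PySem.List.pyRange_one_eq_nil]
  | succ k ih =>
    have h : PySem.List.pyRange 0 ((k : Nat) : Int) 1 ++ [((k : Nat) : Int)] =
        PySem.List.pyRange 0 (((k : Nat) : Int) + 1) 1 :=
      (PySem.List.pyRange_one_succ_right (by exact_mod_cast Int.natCast_nonneg k)).symm
    push_cast
    rw [← h, List.foldl_append]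
    simp only [List.foldl_cons, List.foldl_nil]
    nlinarith [ih]

theorem pv_floordiv_double (q : Int) : PySem.Int.floordiv (q * 2) 2 = q := by
  rw [PySem.Int.floordiv_eq_iff_of_pos (by norm_num)]
  omega

-- ===== VERDICT (by name: the statement is the Claim_ definition above) =====
theorem solution_spec : Claim_equal_solution := by
  unfold Claim_equal_solution
  intro price money count _
  unfold Spec_solution solution solution_alt
  by_cases hc : count > 0
  · simp only [if_pos hc]
    obtain ⟨m, hm⟩ : ∃ m : Nat, ((m : Int)) = count + 1 := ⟨(count + 1).toNat, by omega⟩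
    have hsum := pv_two_sum m
    rw [hm] at hsum
    set S : Int := (PySem.List.pyRange 0 (count + 1) 1).foldl (fun a i => a + i) 0 with hS
    have hX : price * count * (count + 1) = (price * S) * 2 := by linear_combination (-price) * hsum
    rw [hX, pv_floordiv_double]
    have : S * price = price * S := by ring
    rw [this]
    by_cases hgt : price * S > money
    · rw [if_pos hgt, if_pos (by omega)]
    · rw [if_neg hgt, if_neg (by omega)]
  · simp only [if_neg hc]
    have hS : (PySem.List.pyRange 0 (count + 1) 1).foldl (fun a i => a + i) 0 = 0 := by
      rcases lt_or_eq_of_le (by omega : count ≤ 0) with h | h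
      · rw [PySem.List.pyRange_one_eq_nil (by omega)]; rfl
      · subst h
        rw [show (0 : Int) + 1 = 0 + 1 by ring, PySem.List.pyRange_one_singleton]
        rfl
    rw [hS]
    have h0 : PySem.Int.floordiv (price * 0 * (0 + 1)) 2 = 0 := by
      rw [show price * 0 * (0 + 1) = (0 : Int) * 2 by ring, pv_floordiv_double]
    rw [h0]
    simp
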